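-- pv_equiv track=rewrite | github.com/Ronchy2000/Python_Study | 其他/吃鸡蛋问题.py | count_ways
-- ===== SOURCE A (Python) =====
-- def count_ways(total_eggs, min_eggs_per_day, max_eggs_per_day):
--     # 初始化一个列表来存储每种蛋数量的解决方案数
--     dp = [0] * (total_eggs + 1)
--     dp[0] = 1  # 吃掉0个鸡蛋的方案数是1（什么也不吃）
--
--     # 遍历所有的蛋数量
--     for eggs in range(1, total_eggs + 1):
--         for daily_eggs in range(min_eggs_per_day, max_eggs_per_day + 1):
--             if eggs >= daily_eggs:
--                 dp[eggs] += dp[eggs - daily_eggs]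
--
--     return dp[total_eggs]
-- ===== SOURCE B (Python) =====
-- def count_ways(total_eggs, min_eggs_per_day, max_eggs_per_day):
--     # Sliding-window via prefix sums: dp[i] = S(i-lo+1) - S(i-hi), each day eats >= 1 egg.
--     lo = max(min_eggs_per_day, 1)
--     hi = max_eggs_per_day
--     if total_eggs < 0:
--         return 0
--     if lo > hi:
--         return 1 if total_eggs == 0 else 0
--     # prefix[k] = dp[0] + ... + dp[k-1]
--     prefix = [0, 1]
--     for i in range(1, total_eggs + 1):
--         upper = prefix[i - lo + 1] if i - lo + 1 >= 0 else 0
--         lower = prefix[i - hi] if i - hi >= 0 else 0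
--         dp_i = upper - lower
--         prefix.append(prefix[i] + dp_i)
--     return prefix[total_eggs + 1] - prefix[total_eggs]
-- ===== Notes on version B (the rewrite author's own statement) =====
-- stated objective: faster
-- what changed: B replaces A's inner loop that re-sums the dp window for every egg count by a running prefix-sum list, so each dp value is obtained as a difference of two prefix sums in O(1).
import Mathlib
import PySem

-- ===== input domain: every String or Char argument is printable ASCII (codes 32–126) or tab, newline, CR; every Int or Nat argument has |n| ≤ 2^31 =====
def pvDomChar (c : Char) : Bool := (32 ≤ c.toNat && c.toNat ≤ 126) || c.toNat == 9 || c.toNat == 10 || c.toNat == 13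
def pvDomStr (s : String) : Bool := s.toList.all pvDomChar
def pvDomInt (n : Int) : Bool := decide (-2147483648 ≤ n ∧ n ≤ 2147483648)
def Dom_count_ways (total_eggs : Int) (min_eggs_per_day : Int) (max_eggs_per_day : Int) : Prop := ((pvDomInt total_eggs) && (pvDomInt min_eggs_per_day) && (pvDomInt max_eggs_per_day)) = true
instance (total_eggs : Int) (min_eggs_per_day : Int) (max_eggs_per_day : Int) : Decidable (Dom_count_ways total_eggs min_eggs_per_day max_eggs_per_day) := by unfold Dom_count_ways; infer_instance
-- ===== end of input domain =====

-- B replaces A's inner window re-summation by a prefix-sum (sliding-window) table: the inner loop over the daily range disappears.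

-- ===== PORT A =====
-- literal transliteration of A: dp table, inner loop re-sums the window for every eggs
def count_ways (total_eggs : Int) (min_eggs_per_day : Int) (max_eggs_per_day : Int) : Int :=
  let dp0 : List Int := PySem.List.pyRepeat ([0] : List Int) (total_eggs + 1)      -- [0] * (total_eggs + 1)
  let dp1 := PySem.List.pySetD dp0 0 1                               -- dp[0] = 1 (IndexError when empty → outside Pre_)
  let dp := (PySem.List.pyRange 1 (total_eggs + 1) 1).foldl (fun dp eggs =>
      (PySem.List.pyRange min_eggs_per_day (max_eggs_per_day + 1) 1).foldl (fun dp daily_eggs =>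
        if daily_eggs ≤ eggs then
          PySem.List.pySetD dp eggs
            (PySem.List.pyGetD dp eggs 0 + PySem.List.pyGetD dp (eggs - daily_eggs) 0)
        else dp) dp) dp1
  PySem.List.pyGetD dp total_eggs 0

-- ===== PORT B =====
-- literal transliteration of B (Source B): prefix list of partial sums, window sum as a difference
def count_ways_alt (total_eggs : Int) (min_eggs_per_day : Int) (max_eggs_per_day : Int) : Int :=
  let lo := max min_eggs_per_day 1
  let hi := max_eggs_per_day
  if total_eggs < 0 then 0
  else if hi < lo then (if total_eggs = 0 then 1 else 0)
  else
    let prefs := (PySem.List.pyRange 1 (total_eggs + 1) 1).foldl (fun pre i =>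
        let upper := if 0 ≤ i - lo + 1 then PySem.List.pyGetD pre (i - lo + 1) 0 else 0
        let lower := if 0 ≤ i - hi then PySem.List.pyGetD pre (i - hi) 0 else 0
        let dp_i := upper - lower
        pre ++ [PySem.List.pyGetD pre i 0 + dp_i]) [0, 1]
    PySem.List.pyGetD prefs (total_eggs + 1) 0 - PySem.List.pyGetD prefs total_eggs 0

-- ===== PRECONDITION & SPEC =====
-- Pre_ excludes exactly the inputs where A raises IndexError: total_eggs < 0 (dp[0] = 1 on a
-- too-short list), and min_eggs_per_day < 0 with a nonempty daily range and total_eggs ≥ 1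
-- (dp[eggs - daily_eggs] is read past the end of dp).
def Pre_count_ways (total_eggs : Int) (min_eggs_per_day : Int) (max_eggs_per_day : Int) : Prop :=
  0 ≤ total_eggs ∧ (0 ≤ min_eggs_per_day ∨ max_eggs_per_day < min_eggs_per_day ∨ total_eggs = 0)
instance (total_eggs : Int) (min_eggs_per_day : Int) (max_eggs_per_day : Int) : Decidable (Pre_count_ways total_eggs min_eggs_per_day max_eggs_per_day) := by unfold Pre_count_ways; infer_instance
def pvWitness_count_ways : Int × Int × Int := (10, 1, 3)

def Spec_count_ways (total_eggs : Int) (min_eggs_per_day : Int) (max_eggs_per_day : Int) (out : Int) : Prop := out = count_ways_alt total_eggs min_eggs_per_day max_eggs_per_day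
instance (total_eggs : Int) (min_eggs_per_day : Int) (max_eggs_per_day : Int) (out : Int) : Decidable (Spec_count_ways total_eggs min_eggs_per_day max_eggs_per_day out) := by unfold Spec_count_ways; infer_instance

-- ===== CLAIM (what is proved, stated in full; the proofs are below) =====
def Claim_equal_count_ways : Prop := ∀ (total_eggs : Int) (min_eggs_per_day : Int) (max_eggs_per_day : Int), Dom_count_ways total_eggs min_eggs_per_day max_eggs_per_day → Pre_count_ways total_eggs min_eggs_per_day max_eggs_per_day → Spec_count_ways total_eggs min_eggs_per_day max_eggs_per_day (count_ways total_eggs min_eggs_per_day max_eggs_per_day)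

-- ===== LEMMAS AND PROOFS =====

-- the mathematical window sum: ways to reach i, windowed over daily amounts lo..hi
def wrow (lo hi : Int) (l : List Int) (i : Int) : Int :=
  ((PySem.List.pyRange lo (hi + 1) 1).map
    (fun d => if d ≤ i then l.getD (i - d).toNat 0 else 0)).sum

-- the reference dp table: tbl lo hi n = [dp 0, …, dp n]
def tbl (lo hi : Int) : Nat → List Int
  | 0 => [1]
  | n + 1 => tbl lo hi n ++ [wrow lo hi (tbl lo hi n) (n + 1)]

-- partial sums, as B's prefix list stores them
def psums (l : List Int) : List Int := (List.range (l.length + 1)).map (fun j => (l.take j).sum)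

theorem length_tbl (lo hi : Int) (n : Nat) : (tbl lo hi n).length = n + 1 := by
  induction n with
  | zero => rfl
  | succ n ih => simp [tbl, ih]

theorem wrow_nil (lo hi : Int) (l : List Int) (i : Int) (h : hi + 1 ≤ lo) : wrow lo hi l i = 0 := by
  simp [wrow, PySem.List.pyRange_one_eq_nil h]

theorem wrow_cons (lo hi : Int) (l : List Int) (i : Int) (h : lo < hi + 1) :
    wrow lo hi l i = (if lo ≤ i then l.getD (i - lo).toNat 0 else 0) + wrow (lo + 1) hi l i := by
  rw [wrow, PySem.List.pyRange_one_cons h]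
  simp [wrow]

theorem wrow_set (lo hi : Int) (l : List Int) (i v : Int) (h1 : 1 ≤ lo) (hi0 : 0 ≤ i) :
    wrow lo hi (l.set i.toNat v) i = wrow lo hi l i := by
  unfold wrow
  congr 1
  apply List.map_congr_left
  intro d hd
  rw [PySem.List.mem_pyRange_one] at hd
  by_cases hdi : d ≤ i
  · simp only [if_pos hdi]
    have hne : i.toNat ≠ (i - d).toNat := by omega
    simp [List.getD, List.getElem?_set_ne hne]
  · simp [hdi]

theorem wrow_append (lo hi : Int) (l zs : List Int) (i : Int) (h1 : 1 ≤ lo)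
    (hlen : i.toNat ≤ l.length) :
    wrow lo hi (l ++ zs) i = wrow lo hi l i := by
  unfold wrow
  congr 1
  apply List.map_congr_left
  intro d hd
  rw [PySem.List.mem_pyRange_one] at hd
  by_cases hdi : d ≤ i
  · simp only [if_pos hdi]
    have hlt : (i - d).toNat < l.length := by omega
    simp [List.getD, List.getElem?_append_left hlt]
  · simp [hdi]

theorem tbl_empty (lo hi : Int) (h : hi < lo) (n : Nat) :
    tbl lo hi n = 1 :: List.replicate n 0 := by
  induction n with
  | zero => rfl
  | succ n ih =>
    rw [tbl, ih, wrow_nil lo hi _ _ (by omega), List.replicate_succ']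
    rfl

theorem foldl_id {α β : Type} (l : List α) (a : β) : l.foldl (fun a _ => a) a = a := by
  induction l generalizing a with
  | nil => rfl
  | cons x xs ih => simp [List.foldl_cons, ih]

theorem dp1_eq (t : Int) (ht : 0 ≤ t) :
    PySem.List.pySetD (PySem.List.pyRepeat ([0] : List Int) (t + 1)) 0 1 = 1 :: List.replicate t.toNat 0 := by
  rw [PySem.List.pyRepeat_singleton, PySem.List.pySetD_of_nonneg _ _ (by omega)]
  have h1 : (t + 1).toNat = t.toNat + 1 := by omega
  rw [h1, List.replicate_succ]
  rfl

theorem getD_one_replicate (n : Nat) (hn : 1 ≤ n) :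
    (1 :: List.replicate n (0 : Int)).getD n 0 = 0 := by
  obtain ⟨m, rfl⟩ : ∃ m, n = m + 1 := ⟨n - 1, by omega⟩
  simp [List.getD]

-- A's inner loop (daily range starting at lo ≥ 1) accumulates exactly the window sum
theorem innerA (hi : Int) (n : Nat) : ∀ lo : Int, 1 ≤ lo → (hi + 1 - lo).toNat = n →
    ∀ (dp : List Int) (eggs : Int), 1 ≤ eggs → eggs.toNat < dp.length →
    (PySem.List.pyRange lo (hi + 1) 1).foldl (fun dp d =>
        if d ≤ eggs then
          PySem.List.pySetD dp eggs
            (PySem.List.pyGetD dp eggs 0 + PySem.List.pyGetD dp (eggs - d) 0)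
        else dp) dp
    = PySem.List.pySetD dp eggs (PySem.List.pyGetD dp eggs 0 + wrow lo hi dp eggs) := by
  induction n with
  | zero =>
    intro lo hlo hn dp eggs he hlen
    have hnil : hi + 1 ≤ lo := by omega
    rw [PySem.List.pyRange_one_eq_nil hnil, wrow_nil _ _ _ _ hnil]
    rw [List.foldl_nil, add_zero, PySem.List.pySetD_of_nonneg _ _ (by omega),
      PySem.List.pyGetD_of_nonneg _ _ (by omega)]
    rw [List.getD, List.getElem?_eq_getElem hlen]
    exact (List.set_getElem_self hlen).symm
  | succ n ih =>
    intro lo hlo hn dp eggs he hlen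
    have hlt : lo < hi + 1 := by omega
    rw [PySem.List.pyRange_one_cons hlt, List.foldl_cons, wrow_cons _ _ _ _ hlt]
    by_cases hle : lo ≤ eggs
    · rw [if_pos hle, if_pos hle]
      have h0e : (0:Int) ≤ eggs := by omega
      have hlen' : eggs.toNat <
          (PySem.List.pySetD dp eggs (PySem.List.pyGetD dp eggs 0 + PySem.List.pyGetD dp (eggs - lo) 0)).length := by
        rw [PySem.List.pySetD_of_nonneg _ _ h0e, List.length_set]; exact hlen
      rw [ih (lo + 1) (by omega) (by omega) _ eggs he hlen']
      rw [PySem.List.pySetD_of_nonneg _ _ h0e, PySem.List.pySetD_of_nonneg _ _ h0e,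
        PySem.List.pySetD_of_nonneg _ _ h0e, List.set_set,
        PySem.List.pyGetD_of_nonneg _ _ h0e, PySem.List.pyGetD_of_nonneg _ _ h0e,
        PySem.List.pyGetD_of_nonneg _ _ (by omega : (0:Int) ≤ eggs - lo)]
    -- getD of the set list at eggs.toNat, wrow of the set list
      rw [wrow_set _ _ _ _ _ (by omega) h0e]
      congr 1
      have hset : (dp.set eggs.toNat (dp.getD eggs.toNat 0 + dp.getD (eggs - lo).toNat 0)).getD
            eggs.toNat 0 = dp.getD eggs.toNat 0 + dp.getD (eggs - lo).toNat 0 := by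
        simp [List.getD, hlen]
      rw [hset]
      ring
    · rw [if_neg hle, if_neg hle]
      rw [ih (lo + 1) (by omega) (by omega) dp eggs he hlen]
      rw [zero_add]

-- the mn = 0 head step is a no-op when dp[eggs] = 0
theorem innerA_zero (hi : Int) (hhi : 0 ≤ hi)
    (dp : List Int) (eggs : Int) (he : 1 ≤ eggs) (hlen : eggs.toNat < dp.length)
    (hz : PySem.List.pyGetD dp eggs 0 = 0) :
    (PySem.List.pyRange 0 (hi + 1) 1).foldl (fun dp d =>
        if d ≤ eggs then
          PySem.List.pySetD dp eggs
            (PySem.List.pyGetD dp eggs 0 + PySem.List.pyGetD dp (eggs - d) 0)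
        else dp) dp
    = PySem.List.pySetD dp eggs (PySem.List.pyGetD dp eggs 0 + wrow 1 hi dp eggs) := by
  have h0e : (0:Int) ≤ eggs := by omega
  rw [PySem.List.pyRange_one_cons (by omega : (0:Int) < hi + 1), List.foldl_cons,
    if_pos h0e]
  have hget : dp[eggs.toNat] = 0 := by
    rw [PySem.List.pyGetD_of_nonneg _ _ h0e] at hz
    simpa [List.getD, List.getElem?_eq_getElem hlen] using hz
  have hstep : PySem.List.pySetD dp eggs
      (PySem.List.pyGetD dp eggs 0 + PySem.List.pyGetD dp (eggs - 0) 0) = dp := by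
    rw [sub_zero, hz, add_zero, PySem.List.pySetD_of_nonneg _ _ h0e, ← hget]
    exact List.set_getElem_self hlen
  rw [hstep]
  exact innerA hi (hi + 1 - 1).toNat 1 le_rfl rfl dp eggs he hlen

-- window sum = difference of partial sums (the sliding-window identity B uses)
theorem wrow_eq_diff (l : List Int) (i lo : Int) (hlo : 1 ≤ lo) (hi1 : 1 ≤ i)
    (hlen : l.length = i.toNat) :
    ∀ (n : Nat) (hi_ : Int), (hi_ + 1 - lo).toNat = n → lo ≤ hi_ + 1 →
    wrow lo hi_ l i =
      (if 0 ≤ i - lo + 1 then (l.take (i - lo + 1).toNat).sum else 0)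
      - (if 0 ≤ i - hi_ then (l.take (i - hi_).toNat).sum else 0) := by
  intro n
  induction n with
  | zero =>
    intro hi_ hn hle
    have heq : hi_ + 1 = lo := by omega
    rw [wrow_nil _ _ _ _ (by omega)]
    have h2 : i - hi_ = i - lo + 1 := by omega
    rw [h2, sub_self]
  | succ n ih =>
    intro hi_ hn hle
    have hlole : lo ≤ hi_ := by omega
    have hsplit : PySem.List.pyRange lo (hi_ + 1) = PySem.List.pyRange lo ((hi_ - 1) + 1) ++ [hi_] := by
      rw [PySem.List.pyRange_one_succ_right hlole]
      norm_num
    rw [wrow, hsplit, List.map_append, List.sum_append]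
    have ihh := ih (hi_ - 1) (by omega) (by omega)
    rw [wrow] at ihh
    rw [ihh]
    simp only [List.map_cons, List.map_nil, List.sum_cons, List.sum_nil, add_zero]
    by_cases hcase : hi_ ≤ i
    · rw [if_pos hcase]
      have h1 : (0:Int) ≤ i - (hi_ - 1) := by omega
      have h2 : (0:Int) ≤ i - hi_ := by omega
      rw [if_pos h1, if_pos h2]
      have hidx : (i - hi_).toNat < l.length := by omega
      have h3 : (i - (hi_ - 1)).toNat = (i - hi_).toNat + 1 := by omega
      rw [h3, List.sum_take_succ _ _ hidx]
      rw [List.getD, List.getElem?_eq_getElem hidx]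
      simp only [Option.getD_some]
      ring
    · rw [if_neg hcase]
      by_cases h1 : (0:Int) ≤ i - (hi_ - 1)
      · have h0 : (i - (hi_ - 1)).toNat = 0 := by omega
        rw [if_pos h1, h0, if_neg (by omega : ¬ (0:Int) ≤ i - hi_)]
        simp
      · rw [if_neg h1, if_neg (by omega : ¬ (0:Int) ≤ i - hi_)]
        simp

theorem psums_getD (l : List Int) (j : Nat) (h : j ≤ l.length) :
    (psums l).getD j 0 = (l.take j).sum := by
  unfold psums
  rw [List.getD, List.getElem?_map, List.getElem?_range (by omega : j < l.length + 1)]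
  rfl

theorem psums_append (l : List Int) (x : Int) :
    psums (l ++ [x]) = psums l ++ [l.sum + x] := by
  unfold psums
  have hl : (l ++ [x]).length = l.length + 1 := by simp
  rw [hl, List.range_succ, List.map_append]
  congr 1
  · apply List.map_congr_left
    intro j hj
    rw [List.mem_range] at hj
    rw [List.take_append_of_le_length (by omega)]
  · simp only [List.map_cons, List.map_nil]
    rw [List.take_of_length_le (by simp)]
    simp

-- outer invariant for A (main case): dp after k steps = tbl ++ zeros
theorem outerA (t : Int) (mn mx : Int) (ht : 0 ≤ t) (hmn : 0 ≤ mn) (hc : 1 ≤ mn ∨ 0 ≤ mx) :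
    ∀ k : Nat, k ≤ t.toNat →
    (PySem.List.pyRange 1 ((k : Int) + 1) 1).foldl (fun dp eggs =>
      (PySem.List.pyRange mn (mx + 1) 1).foldl (fun dp daily_eggs =>
        if daily_eggs ≤ eggs then
          PySem.List.pySetD dp eggs
            (PySem.List.pyGetD dp eggs 0 + PySem.List.pyGetD dp (eggs - daily_eggs) 0)
        else dp) dp) (PySem.List.pySetD (PySem.List.pyRepeat ([0] : List Int) (t + 1)) 0 1)
    = tbl (max mn 1) mx k ++ List.replicate (t.toNat - k) 0 := by
  intro k
  induction k with
  | zero =>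
    intro _
    rw [show ((0:Nat):Int) + 1 = 1 by norm_num, PySem.List.pyRange_one_eq_nil le_rfl,
      List.foldl_nil, dp1_eq t ht, tbl]
    have h1 : t.toNat - 0 = t.toNat := by omega
    rw [h1]
    rfl
  | succ k ih =>
    intro hk
    have hk' : k ≤ t.toNat := by omega
    have hcast : ((k + 1 : Nat) : Int) + 1 = ((k : Int) + 1) + 1 := by push_cast; ring
    rw [hcast, PySem.List.pyRange_one_succ_right (by omega : (1:Int) ≤ (k:Int) + 1),
      List.foldl_append, ih hk', List.foldl_cons, List.foldl_nil]
    have hlo1 : (1:Int) ≤ max mn 1 := le_max_right _ _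
    have hlength : (tbl (max mn 1) mx k ++ List.replicate (t.toNat - k) 0).length = t.toNat + 1 := by
      simp [length_tbl]; omega
    have he : (1:Int) ≤ (k:Int) + 1 := by omega
    have hiN : ((k:Int) + 1).toNat = k + 1 := by omega
    have hlen : ((k:Int) + 1).toNat < (tbl (max mn 1) mx k ++ List.replicate (t.toNat - k) 0).length := by
      rw [hlength]; omega
    have hz : PySem.List.pyGetD (tbl (max mn 1) mx k ++ List.replicate (t.toNat - k) 0) ((k:Int) + 1) 0 = 0 := by
      rw [PySem.List.pyGetD_of_nonneg _ _ (by omega), hiN, List.getD,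
        List.getElem?_append_right (by rw [length_tbl])]
      rw [length_tbl]
      simp [show 0 < t.toNat - k by omega]
    have hinner : (PySem.List.pyRange mn (mx + 1) 1).foldl (fun dp daily_eggs =>
        if daily_eggs ≤ (k:Int) + 1 then
          PySem.List.pySetD dp ((k:Int) + 1)
            (PySem.List.pyGetD dp ((k:Int) + 1) 0 + PySem.List.pyGetD dp ((k:Int) + 1 - daily_eggs) 0)
        else dp) (tbl (max mn 1) mx k ++ List.replicate (t.toNat - k) 0)
        = PySem.List.pySetD (tbl (max mn 1) mx k ++ List.replicate (t.toNat - k) 0) ((k:Int) + 1)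
            (PySem.List.pyGetD (tbl (max mn 1) mx k ++ List.replicate (t.toNat - k) 0) ((k:Int) + 1) 0
              + wrow (max mn 1) mx (tbl (max mn 1) mx k ++ List.replicate (t.toNat - k) 0) ((k:Int) + 1)) := by
      by_cases h1 : 1 ≤ mn
      · have hmax : max mn 1 = mn := max_eq_left h1
        rw [hmax] at hlen ⊢
        exact innerA mx (mx + 1 - mn).toNat mn h1 rfl _ _ he hlen
      · have hmn0 : mn = 0 := by omega
        have hmx0 : (0:Int) ≤ mx := by rcases hc with h | h <;> omega
        subst hmn0
        have hmax : max (0:Int) 1 = 1 := by norm_num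
        rw [hmax] at hlen hz ⊢
        exact innerA_zero mx hmx0 _ _ he hlen hz
    rw [hinner, hz, zero_add]
    rw [wrow_append _ _ _ _ _ hlo1 (by rw [length_tbl]; omega)]
    rw [PySem.List.pySetD_of_nonneg _ _ (by omega), hiN]
    rw [List.set_append, if_neg (by rw [length_tbl]; omega), length_tbl]
    have hrep : t.toNat - k = (t.toNat - (k + 1)) + 1 := by omega
    rw [show k + 1 - (k + 1) = 0 by omega, hrep, List.replicate_succ, List.set_cons_zero]
    have htbl : tbl (max mn 1) mx (k + 1)
        = tbl (max mn 1) mx k ++ [wrow (max mn 1) mx (tbl (max mn 1) mx k) ((k:Int) + 1)] := by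
      rw [tbl]
    rw [htbl, List.append_assoc]
    rfl

-- A's whole loop is the identity when the daily range is empty
theorem outerA_empty (mn mx : Int) (h : mx + 1 ≤ mn) (dp : List Int) (a b : Int) :
    (PySem.List.pyRange a b 1).foldl (fun dp eggs =>
      (PySem.List.pyRange mn (mx + 1) 1).foldl (fun dp daily_eggs =>
        if daily_eggs ≤ eggs then
          PySem.List.pySetD dp eggs
            (PySem.List.pyGetD dp eggs 0 + PySem.List.pyGetD dp (eggs - daily_eggs) 0)
        else dp) dp) dp = dp := by
  rw [PySem.List.pyRange_one_eq_nil h]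
  simp only [List.foldl_nil]
  exact foldl_id _ _

-- outer invariant for B (main case): prefix after k steps = partial sums of tbl
theorem outerB (t : Int) (lo hi : Int) (hlo : 1 ≤ lo) (hw : lo ≤ hi) :
    ∀ k : Nat, k ≤ t.toNat →
    (PySem.List.pyRange 1 ((k : Int) + 1) 1).foldl (fun pre i =>
        let upper := if 0 ≤ i - lo + 1 then PySem.List.pyGetD pre (i - lo + 1) 0 else 0
        let lower := if 0 ≤ i - hi then PySem.List.pyGetD pre (i - hi) 0 else 0
        let dp_i := upper - lower
        pre ++ [PySem.List.pyGetD pre i 0 + dp_i]) [0, 1]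
    = psums (tbl lo hi k) := by
  intro k
  induction k with
  | zero =>
    intro _
    rw [show ((0:Nat):Int) + 1 = 1 by norm_num, PySem.List.pyRange_one_eq_nil le_rfl,
      List.foldl_nil]
    rfl
  | succ k ih =>
    intro hk
    have hcast : ((k + 1 : Nat) : Int) + 1 = ((k : Int) + 1) + 1 := by push_cast; ring
    rw [hcast, PySem.List.pyRange_one_succ_right (by omega : (1:Int) ≤ (k:Int) + 1),
      List.foldl_append, ih (by omega), List.foldl_cons, List.foldl_nil]
    have hlenl : (tbl lo hi k).length = k + 1 := length_tbl lo hi k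
    have hiN : ((k:Int) + 1).toNat = k + 1 := by omega
    have hup : (if 0 ≤ (k:Int) + 1 - lo + 1 then PySem.List.pyGetD (psums (tbl lo hi k)) ((k:Int) + 1 - lo + 1) 0 else 0)
        = (if 0 ≤ (k:Int) + 1 - lo + 1 then ((tbl lo hi k).take ((k:Int) + 1 - lo + 1).toNat).sum else 0) := by
      by_cases hu : (0:Int) ≤ (k:Int) + 1 - lo + 1
      · rw [if_pos hu, if_pos hu, PySem.List.pyGetD_of_nonneg _ _ hu,
          psums_getD _ _ (by omega)]
      · rw [if_neg hu, if_neg hu]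
    have hlow : (if 0 ≤ (k:Int) + 1 - hi then PySem.List.pyGetD (psums (tbl lo hi k)) ((k:Int) + 1 - hi) 0 else 0)
        = (if 0 ≤ (k:Int) + 1 - hi then ((tbl lo hi k).take ((k:Int) + 1 - hi).toNat).sum else 0) := by
      by_cases hu : (0:Int) ≤ (k:Int) + 1 - hi
      · rw [if_pos hu, if_pos hu, PySem.List.pyGetD_of_nonneg _ _ hu,
          psums_getD _ _ (by omega)]
      · rw [if_neg hu, if_neg hu]
    have hmid : PySem.List.pyGetD (psums (tbl lo hi k)) ((k:Int) + 1) 0 = (tbl lo hi k).sum := by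
      rw [PySem.List.pyGetD_of_nonneg _ _ (by omega), hiN, psums_getD _ _ (by omega),
        ← hlenl, List.take_length]
    have hdiff := wrow_eq_diff (tbl lo hi k) ((k:Int) + 1) lo hlo (by omega) (by omega)
      (hi + 1 - lo).toNat hi rfl (by omega)
    simp only [hup, hlow, hmid]
    rw [← hdiff, ← psums_append]
    have htbl : tbl lo hi (k + 1)
        = tbl lo hi k ++ [wrow lo hi (tbl lo hi k) ((k:Int) + 1)] := by
      rw [tbl]
    rw [htbl]

-- ===== VERDICT (by name: the statement is the Claim_ definition above) =====
theorem count_ways_spec : Claim_equal_count_ways := by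
  intro t mn mx _ hpre
  obtain ⟨ht, hp2⟩ := hpre
  unfold Spec_count_ways
  by_cases ht0 : t = 0
  · subst ht0
    have hA : count_ways 0 mn mx = 1 := by
      simp only [count_ways]
      rw [PySem.List.pyRange_one_eq_nil (by norm_num : (0:Int) + 1 ≤ 1), List.foldl_nil]
      decide
    have hB : count_ways_alt 0 mn mx = 1 := by
      simp only [count_ways_alt]
      rw [if_neg (by omega)]
      by_cases hbb : mx < max mn 1
      · rw [if_pos hbb]
        norm_num
      · rw [if_neg hbb]
        rw [PySem.List.pyRange_one_eq_nil (by norm_num : (0:Int) + 1 ≤ 1), List.foldl_nil]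
        decide
    rw [hA, hB]
  · by_cases hemp : mx + 1 ≤ mn
    · have hA : count_ways t mn mx = 0 := by
        simp only [count_ways]
        rw [outerA_empty mn mx hemp _ _ _, dp1_eq t ht,
          PySem.List.pyGetD_of_nonneg _ _ ht]
        exact getD_one_replicate t.toNat (by omega)
      have hB : count_ways_alt t mn mx = 0 := by
        simp only [count_ways_alt]
        rw [if_neg (by omega),
          if_pos (lt_of_lt_of_le (by omega : mx < mn) (le_max_left mn 1)), if_neg ht0]
      rw [hA, hB]
    · have hmn0 : (0:Int) ≤ mn := by rcases hp2 with h | h | h <;> omega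
      have hc : 1 ≤ mn ∨ (0:Int) ≤ mx := by omega
      have hml := le_max_left mn 1
      have hmr : (1:Int) ≤ max mn 1 := le_max_right mn 1
      have hchoice := max_choice mn 1
      by_cases hw : mx < max mn 1
      · have hmn00 : mn = 0 := by rcases hchoice with h | h <;> omega
        have hmx00 : mx = 0 := by rcases hchoice with h | h <;> omega
        subst hmn00; subst hmx00
        have hA : count_ways t 0 0 = 0 := by
          simp only [count_ways]
          have h := outerA t 0 0 ht le_rfl (Or.inr le_rfl) t.toNat le_rfl
          rw [Int.toNat_of_nonneg ht] at h
          rw [h, tbl_empty _ _ (by norm_num) t.toNat,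
            show t.toNat - t.toNat = 0 by omega, List.replicate_zero, List.append_nil,
            PySem.List.pyGetD_of_nonneg _ _ ht]
          exact getD_one_replicate t.toNat (by omega)
        have hB : count_ways_alt t 0 0 = 0 := by
          simp only [count_ways_alt]
          rw [if_neg (by omega), if_pos hw, if_neg ht0]
        rw [hA, hB]
      · have hlomx : max mn 1 ≤ mx := not_lt.mp hw
        have hA := outerA t mn mx ht hmn0 hc t.toNat le_rfl
        rw [Int.toNat_of_nonneg ht] at hA
        have hB := outerB t (max mn 1) mx hmr hlomx t.toNat le_rfl
        rw [Int.toNat_of_nonneg ht] at hB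
        have hlenl : (tbl (max mn 1) mx t.toNat).length = t.toNat + 1 := length_tbl _ _ _
        have hAv : count_ways t mn mx = (tbl (max mn 1) mx t.toNat)[t.toNat]'(by omega) := by
          simp only [count_ways]
          rw [hA, show t.toNat - t.toNat = 0 by omega, List.replicate_zero, List.append_nil,
            PySem.List.pyGetD_of_nonneg _ _ ht, List.getD,
            List.getElem?_eq_getElem (by omega)]
          rfl
        have hBv : count_ways_alt t mn mx = (tbl (max mn 1) mx t.toNat)[t.toNat]'(by omega) := by
          simp only [count_ways_alt]
          rw [if_neg (by omega), if_neg hw, hB,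
            PySem.List.pyGetD_of_nonneg _ _ (by omega : (0:Int) ≤ t + 1),
            PySem.List.pyGetD_of_nonneg _ _ ht,
            show (t + 1).toNat = t.toNat + 1 by omega,
            psums_getD _ _ (by omega), psums_getD _ _ (by omega),
            List.sum_take_succ _ _ (by omega)]
          ring
        rw [hAv, hBv]
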